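-- pv_equiv track=rewrite | github.com/KirbysGit/taylor.io | backend/generator/layout_sidebar_split.py | sidebar_rail_section_order
-- ===== SOURCE A (Python) =====
-- from typing import Any, Dict, List
--
-- _DEFAULT_SECTION_ORDER = [
--     "header",
--     "summary",
--     "education",
--     "experience",
--     "projects",
--     "skills",
-- ]
--
-- _SIDEBAR_RAIL_KEY_SET = frozenset({"skills", "education"})
--
-- def raw_body_order(resume_data: Dict[str, Any]) -> List[str]:
--     """Section keys from payload order, excluding header only (no summary-first normalization)."""
--     section_order = resume_data.get("sectionOrder", list(_DEFAULT_SECTION_ORDER))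
--     return [k for k in section_order if k != "header"]
--
-- def sidebar_rail_section_order(resume_data: Dict[str, Any]) -> List[str]:
--     """
--     Skills vs education order follows resume_data.sectionOrder (same source as the Organize UI).
--     Keys omitted from sectionOrder default to skills, then education.
--     """
--     raw = raw_body_order(resume_data)
--     ordered: List[str] = []
--     seen: set = set()
--     for k in raw:
--         if k in _SIDEBAR_RAIL_KEY_SET and k not in seen:
--             ordered.append(k)
--             seen.add(k)
--     for k in ("skills", "education"):
--         if k not in seen:
--             ordered.append(k)
--             seen.add(k)
--     return ordered
-- ===== SOURCE B (Python) =====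
-- _DEFAULT_SECTION_ORDER = [
--     "header",
--     "summary",
--     "education",
--     "experience",
--     "projects",
--     "skills",
-- ]
--
-- def sidebar_rail_section_order(resume_data):
--     """Position-based: compare first occurrences of the two keys in sectionOrder,
--     with len(order) as the 'absent' sentinel (absent keys default after present ones,
--     skills before education when both are absent)."""
--     order = resume_data.get("sectionOrder", _DEFAULT_SECTION_ORDER)
--     n = len(order)
--     edu = order.index("education") if "education" in order else n
--     sk = order.index("skills") if "skills" in order else n
--     return ["education", "skills"] if edu < sk else ["skills", "education"]
-- ===== Notes on version B (the rewrite author's own statement) =====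
-- stated objective: simpler
-- what changed: Replaced the membership+dedup accumulation scan plus default-fixup loop by comparing the first-occurrence positions of 'education' and 'skills' in sectionOrder (len as absent sentinel) and returning one of two fixed two-element lists.
import Mathlib
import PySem

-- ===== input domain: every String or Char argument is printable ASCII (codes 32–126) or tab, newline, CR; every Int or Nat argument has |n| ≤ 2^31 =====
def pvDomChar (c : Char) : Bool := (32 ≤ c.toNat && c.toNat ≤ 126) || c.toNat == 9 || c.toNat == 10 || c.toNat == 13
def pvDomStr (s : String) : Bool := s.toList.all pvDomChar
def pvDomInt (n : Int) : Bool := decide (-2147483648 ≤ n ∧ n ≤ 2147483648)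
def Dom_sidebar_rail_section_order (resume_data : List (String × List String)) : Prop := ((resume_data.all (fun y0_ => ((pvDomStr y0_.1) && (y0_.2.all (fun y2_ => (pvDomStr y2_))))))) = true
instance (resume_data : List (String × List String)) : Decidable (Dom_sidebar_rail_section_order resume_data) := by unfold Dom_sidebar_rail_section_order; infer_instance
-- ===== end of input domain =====

-- B replaces A's membership+dedup scan and fixup loop by comparing the first-occurrence
-- positions of the two keys (sentinel = len), a single comparison: objective 'simpler'.


-- ===== PORT A =====
def defaultSectionOrder : List String :=
  ["header", "summary", "education", "experience", "projects", "skills"]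

def raw_body_order (resume_data : List (String × List String)) : List String :=
  let section_order := (PySem.Dict.mk resume_data).getD "sectionOrder" defaultSectionOrder
  section_order.filter (fun k => k != "header")

-- body of A's first loop: append k if it is a rail key not yet seen
def stepA (st : List String × PySem.Set String) (k : String) : List String × PySem.Set String :=
  if (k == "skills" || k == "education") && !(PySem.Set.contains st.2 k) then
    (st.1 ++ [k], PySem.Set.add st.2 k)
  else st

-- body of A's second (fixup) loop: append k if not yet seen
def stepFix (st : List String × PySem.Set String) (k : String) : List String × PySem.Set String :=
  if !(PySem.Set.contains st.2 k) then (st.1 ++ [k], PySem.Set.add st.2 k) else st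

def sidebar_rail_section_order (resume_data : List (String × List String)) : List String :=
  let raw := raw_body_order resume_data
  let st := raw.foldl stepA ([], PySem.Set.empty)
  let st2 := ["skills", "education"].foldl stepFix st
  st2.1

-- ===== PORT B =====
def sidebar_rail_section_order_alt (resume_data : List (String × List String)) : List String :=
  let order := (PySem.Dict.mk resume_data).getD "sectionOrder" defaultSectionOrder
  let n := order.length
  let edu := (PySem.List.index? order "education").getD n
  let sk := (PySem.List.index? order "skills").getD n
  if edu < sk then ["education", "skills"] else ["skills", "education"]

-- ===== PRECONDITION & SPEC =====
def Spec_sidebar_rail_section_order (resume_data : List (String × List String)) (out : List String) : Prop := out = sidebar_rail_section_order_alt resume_data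
instance (resume_data : List (String × List String)) (out : List String) : Decidable (Spec_sidebar_rail_section_order resume_data out) := by unfold Spec_sidebar_rail_section_order; infer_instance

-- ===== CLAIM (what is proved, stated in full; the proofs are below) =====
def Claim_equal_sidebar_rail_section_order : Prop := ∀ (resume_data : List (String × List String)), Dom_sidebar_rail_section_order resume_data → Spec_sidebar_rail_section_order resume_data (sidebar_rail_section_order resume_data)

-- ===== LEMMAS AND PROOFS =====

-- "education occurs strictly before skills" (absent = after the end)
def eduFirst : List String → Bool
  | [] => false
  | k :: t => if k = "education" then true else if k = "skills" then false else eduFirst t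

lemma getD_map_succ (o : Option Nat) (n : Nat) :
    (o.map (· + 1)).getD (n + 1) = o.getD n + 1 := by cases o <;> rfl

-- B's position comparison computes eduFirst
lemma idx_lt_iff (L : List String) :
    ((PySem.List.index? L "education").getD L.length <
      (PySem.List.index? L "skills").getD L.length) ↔ eduFirst L = true := by
  induction L with
  | nil => simp [PySem.List.index?, eduFirst]
  | cons k t ih =>
    by_cases he : k = "education"
    · subst he
      rw [PySem.List.index?_cons_self, PySem.List.index?_cons_of_ne t (by decide)]
      simp [eduFirst]
    · by_cases hs : k = "skills"
      · subst hs
        rw [PySem.List.index?_cons_self, PySem.List.index?_cons_of_ne t (by decide)]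
        simp [eduFirst]
      · rw [PySem.List.index?_cons_of_ne t he,
            PySem.List.index?_cons_of_ne t hs]
        simpa [eduFirst, he, hs, List.length_cons, getD_map_succ] using ih

-- dropping "header" entries does not change eduFirst
lemma eduFirst_filter (L : List String) :
    eduFirst (L.filter (fun k => k != "header")) = eduFirst L := by
  induction L with
  | nil => rfl
  | cons k t ih =>
    by_cases hh : k = "header"
    · subst hh; simpa [eduFirst] using ih
    · by_cases he : k = "education"
      · subst he; simp [eduFirst]
      · by_cases hs : k = "skills"
        · subst hs; simp [eduFirst]
        · simp [hh, eduFirst, he, hs, ih]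

-- once both keys are seen, A's first loop is inert
lemma foldl_stepA_both (t : List String) (p s : List String)
    (hs : "skills" ∈ s) (he : "education" ∈ s) :
    t.foldl stepA (p, s) = (p, s) := by
  induction t with
  | nil => rfl
  | cons k t ih =>
    have hk : stepA (p, s) k = (p, s) := by
      by_cases h1 : k = "skills"
      · simp [stepA, h1, PySem.Set.contains, hs]
      · by_cases h2 : k = "education"
        · simp [stepA, h2, PySem.Set.contains, he]
        · simp [stepA, h1, h2]
    simp [List.foldl_cons, hk, ih]

def fixup (st : List String × PySem.Set String) : List String :=
  (["skills", "education"].foldl stepFix st).1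

-- after "skills" was appended first, the answer is ["skills","education"]
lemma fold_after_skills (t : List String) :
    fixup (t.foldl stepA (["skills"], ["skills"])) = ["skills", "education"] := by
  induction t with
  | nil => decide
  | cons k t ih =>
    by_cases he : k = "education"
    · subst he
      have h1 : stepA (["skills"], ["skills"]) "education"
          = (["skills", "education"], ["skills", "education"]) := by decide
      rw [List.foldl_cons, h1,
        foldl_stepA_both t _ _ (by decide) (by decide)]
      decide
    · by_cases hs : k = "skills"
      · subst hs
        have h1 : stepA (["skills"], ["skills"]) "skills" = (["skills"], ["skills"]) := by decide
        rw [List.foldl_cons, h1]; exact ih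
      · have h1 : stepA (["skills"], ["skills"]) k = (["skills"], ["skills"]) := by
          simp [stepA, hs, he]
        rw [List.foldl_cons, h1]; exact ih

-- after "education" was appended first, the answer is ["education","skills"]
lemma fold_after_edu (t : List String) :
    fixup (t.foldl stepA (["education"], ["education"])) = ["education", "skills"] := by
  induction t with
  | nil => decide
  | cons k t ih =>
    by_cases hs : k = "skills"
    · subst hs
      have h1 : stepA (["education"], ["education"]) "skills"
          = (["education", "skills"], ["education", "skills"]) := by decide
      rw [List.foldl_cons, h1,
        foldl_stepA_both t _ _ (by decide) (by decide)]
      decide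
    · by_cases he : k = "education"
      · subst he
        have h1 : stepA (["education"], ["education"]) "education"
            = (["education"], ["education"]) := by decide
        rw [List.foldl_cons, h1]; exact ih
      · have h1 : stepA (["education"], ["education"]) k = (["education"], ["education"]) := by
          simp [stepA, hs, he]
        rw [List.foldl_cons, h1]; exact ih

-- A's whole pipeline on any raw list is decided by eduFirst
lemma pipeline_eq (raw : List String) :
    fixup (raw.foldl stepA ([], PySem.Set.empty))
      = if eduFirst raw then ["education", "skills"] else ["skills", "education"] := by
  induction raw with
  | nil => decide
  | cons k t ih =>
    by_cases he : k = "education"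
    · subst he
      have h1 : stepA ([], PySem.Set.empty) "education"
          = (["education"], ["education"]) := by decide
      rw [List.foldl_cons, h1, fold_after_edu]
      simp [eduFirst]
    · by_cases hs : k = "skills"
      · subst hs
        have h1 : stepA ([], PySem.Set.empty) "skills" = (["skills"], ["skills"]) := by decide
        rw [List.foldl_cons, h1, fold_after_skills]
        simp [eduFirst]
      · have h1 : stepA ([], PySem.Set.empty) k = ([], PySem.Set.empty) := by
          simp [stepA, hs, he]
        rw [List.foldl_cons, h1]
        simpa [eduFirst, he, hs] using ih

-- ===== VERDICT (by name: the statement is the Claim_ definition above) =====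
theorem sidebar_rail_section_order_spec : Claim_equal_sidebar_rail_section_order := by
  intro resume_data _
  unfold Spec_sidebar_rail_section_order sidebar_rail_section_order sidebar_rail_section_order_alt
    raw_body_order
  set L := (PySem.Dict.mk resume_data).getD "sectionOrder" defaultSectionOrder with hL
  show fixup ((L.filter (fun k => k != "header")).foldl stepA ([], PySem.Set.empty)) = _
  rw [pipeline_eq, eduFirst_filter]
  by_cases h : ((PySem.List.index? L "education").getD L.length <
      (PySem.List.index? L "skills").getD L.length)
  · rw [if_pos ((idx_lt_iff L).mp h), if_pos h]
  · rw [if_neg (fun hc => h ((idx_lt_iff L).mpr hc)), if_neg h]
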